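-- pv_equiv track=rewrite | github.com/threegold116/ARPO-OCT | evaluation/src/evaluator.py | count_valid_tags
-- ===== SOURCE A (Python) =====
-- def count_valid_tags(text: str, tag: str) -> int:
--     """Count valid paired tags."""
--     count = 0
--     current_pos = 0
--
--     while True:
--         start_tag = f"<{tag}>"
--         end_tag = f"</{tag}>"
--
--         start_pos = text.find(start_tag, current_pos)
--         if start_pos == -1:
--             break
--
--         end_pos = text.find(end_tag, start_pos + len(start_tag))
--         if end_pos == -1:
--             break
--
--         count += 1
--         current_pos = end_pos + len(end_tag)
--
--     return count
-- ===== SOURCE B (Python) =====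
-- def count_valid_tags(text: str, tag: str) -> int:
--     """Count valid paired tags by a single left-to-right character scan with an open/closed state machine."""
--     start_tag = f"<{tag}>"
--     end_tag = f"</{tag}>"
--     count = 0
--     open_ = False
--     i = 0
--     n = len(text)
--     while i < n:
--         if not open_ and text.startswith(start_tag, i):
--             open_ = True
--             i += len(start_tag)
--         elif open_ and text.startswith(end_tag, i):
--             count += 1
--             open_ = False
--             i += len(end_tag)
--         else:
--             i += 1
--     return count
-- ===== Notes on version B (the rewrite author's own statement) =====
-- stated objective: alternative
-- what changed: A's repeated str.find calls with a cursor that jumps past each matched pair are replaced by a single left-to-right character scan maintaining an open/closed state flag, counting each close tag found while open.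
import Mathlib
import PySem

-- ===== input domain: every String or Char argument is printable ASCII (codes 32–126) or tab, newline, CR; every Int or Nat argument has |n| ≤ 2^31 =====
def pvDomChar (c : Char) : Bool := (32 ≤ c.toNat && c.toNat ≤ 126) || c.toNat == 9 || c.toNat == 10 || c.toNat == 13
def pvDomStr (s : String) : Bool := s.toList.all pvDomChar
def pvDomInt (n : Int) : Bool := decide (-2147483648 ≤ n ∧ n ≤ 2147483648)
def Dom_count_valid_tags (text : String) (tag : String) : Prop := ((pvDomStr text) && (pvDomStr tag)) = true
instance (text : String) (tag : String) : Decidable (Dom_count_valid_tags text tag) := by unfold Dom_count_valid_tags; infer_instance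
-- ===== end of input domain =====

-- B replaces A's repeated `str.find` cursor loop by a single left-to-right character scan
-- with an open/closed state machine (objective: alternative, same asymptotic cost).

-- ===== PORT A =====
-- A's while-loop: repeatedly find the next start tag from the cursor, then the nearest
-- end tag after it, count, and move the cursor past the end tag.  The fuel argument is
-- only a structural-termination guard; text.length + 1 is always sufficient.
def pvLoopA (t tg : List Char) : Nat → Nat → Int → Int
  | 0, _, count => count
  | fuel + 1, current_pos, count =>
    let start_tag := ('<' :: tg) ++ ['>']            -- f"<{tag}>"
    let end_tag := ('<' :: '/' :: tg) ++ ['>']       -- f"</{tag}>"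
    let start_pos := PySem.Chars.findFrom t start_tag (current_pos : Int) none
    if start_pos = -1 then count
    else
      let end_pos := PySem.Chars.findFrom t end_tag (start_pos + (start_tag.length : Int)) none
      if end_pos = -1 then count
      else pvLoopA t tg fuel (end_pos + (end_tag.length : Int)).toNat (count + 1)

def count_valid_tags (text : String) (tag : String) : Int :=
  pvLoopA text.toList tag.toList (text.toList.length + 1) 0 0

-- ===== PORT B =====
-- B's single scan: walk the text one position at a time, flipping an open/closed flag
-- when the sought tag starts at the current position, counting each close.  The fuel
-- argument is only a structural-termination guard; text.length + 1 is always sufficient.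
def pvScanB (t tg : List Char) : Nat → Nat → Bool → Int → Int
  | 0, _, _, count => count
  | fuel + 1, i, opened, count =>
    let start_tag := ('<' :: tg) ++ ['>']
    let end_tag := ('<' :: '/' :: tg) ++ ['>']
    if i < t.length then
      if opened = false ∧ PySem.Chars.startswith (t.drop i) start_tag then
        pvScanB t tg fuel (i + start_tag.length) true count
      else if opened = true ∧ PySem.Chars.startswith (t.drop i) end_tag then
        pvScanB t tg fuel (i + end_tag.length) false (count + 1)
      else pvScanB t tg fuel (i + 1) opened count
    else count

def count_valid_tags_alt (text : String) (tag : String) : Int :=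
  pvScanB text.toList tag.toList (text.toList.length + 1) 0 false 0

-- ===== PRECONDITION & SPEC =====
def Spec_count_valid_tags (text : String) (tag : String) (out : Int) : Prop := out = count_valid_tags_alt text tag
instance (text : String) (tag : String) (out : Int) : Decidable (Spec_count_valid_tags text tag out) := by unfold Spec_count_valid_tags; infer_instance

-- ===== CLAIM (what is proved, stated in full; the proofs are below) =====
def Claim_equal_count_valid_tags : Prop := ∀ (text : String) (tag : String), Dom_count_valid_tags text tag → Spec_count_valid_tags text tag (count_valid_tags text tag)

-- ===== LEMMAS AND PROOFS =====

-- a start index past the length finds nothing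
theorem pvFF_gt (t sub : List Char) (k : Nat) (h : t.length < k) :
    PySem.Chars.findFrom t sub (k : Int) none = -1 := by
  simp only [PySem.Chars.findFrom]
  have h1 : ¬ ((k : Int) < 0) := by omega
  have h2 : ((t.length : Int) < (k : Int)) := by exact_mod_cast h
  simp [h1, h2]


-- findFrom at an exact match position returns that position
theorem pvFF_match (t sub : List Char) (k : Nat) (hk : k ≤ t.length) (h : sub <+: t.drop k) :
    PySem.Chars.findFrom t sub (k : Int) none = (k : Int) := by
  rw [PySem.Chars.findFrom_natCast t sub k hk]
  have hinf : sub <:+: t.drop k := h.isInfix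
  have hnn : 0 ≤ PySem.Chars.find (t.drop k) sub := (PySem.Chars.find_nonneg_iff _ _).2 hinf
  obtain ⟨h1, h2⟩ := PySem.Chars.find_spec hnn
  have hz : PySem.Chars.find (t.drop k) sub = 0 := by
    by_contra hne
    have : (0:Nat) < (PySem.Chars.find (t.drop k) sub).toNat := by omega
    exact h2 0 this (by simpa using h)
  simp [hz]

-- a nonempty sub is never found at or past the end
theorem pvFF_ge (t sub : List Char) (hsub : sub ≠ []) (k : Nat) (h : t.length ≤ k) :
    PySem.Chars.findFrom t sub (k : Int) none = -1 := by
  rcases Nat.lt_or_ge t.length k with hlt | hge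
  · exact pvFF_gt t sub k hlt
  · have hk : k = t.length := by omega
    subst hk
    refine (PySem.Chars.findFrom_natCast_eq_neg_one_iff t sub t.length le_rfl).2 ?_
    simp [List.drop_length, List.infix_nil, hsub]

-- findFrom skips a position where sub does not start
theorem pvFF_step (t sub : List Char) (k : Nat) (hk : k ≤ t.length) (h : ¬ sub <+: t.drop k) :
    PySem.Chars.findFrom t sub (k : Int) none = PySem.Chars.findFrom t sub ((k + 1 : Nat) : Int) none := by
  rcases Nat.lt_or_ge k t.length with hlt | hge
  · have hk1 : k + 1 ≤ t.length := hlt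
    have hcons : t.drop k = t[k] :: t.drop (k + 1) := List.drop_eq_getElem_cons hlt
    have hinf_iff : (sub <:+: t.drop k) ↔ (sub <:+: t.drop (k + 1)) := by
      rw [hcons, List.infix_cons_iff]
      constructor
      · rintro (hp | hi)
        · exact absurd (hcons ▸ hp) h
        · exact hi
      · exact fun hi => Or.inr hi
    by_cases hA : PySem.Chars.findFrom t sub (k : Int) none = -1
    · have hni : ¬ sub <:+: t.drop k :=
        (PySem.Chars.findFrom_natCast_eq_neg_one_iff t sub k hk).1 hA
      rw [hA]
      exact ((PySem.Chars.findFrom_natCast_eq_neg_one_iff t sub (k + 1) hk1).2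
        (fun hi => hni (hinf_iff.2 hi))).symm
    · have hB : PySem.Chars.findFrom t sub ((k + 1 : Nat) : Int) none ≠ -1 := by
        intro hB
        have hni : ¬ sub <:+: t.drop (k + 1) :=
          (PySem.Chars.findFrom_natCast_eq_neg_one_iff t sub (k + 1) hk1).1 hB
        exact hA ((PySem.Chars.findFrom_natCast_eq_neg_one_iff t sub k hk).2
          (fun hi => hni (hinf_iff.1 hi)))
      obtain ⟨ha1, ha2, ha3⟩ := PySem.Chars.findFrom_natCast_spec t sub k hk hA
      obtain ⟨hb1, hb2, hb3⟩ := PySem.Chars.findFrom_natCast_spec t sub (k + 1) hk1 hB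
      have hAne : (PySem.Chars.findFrom t sub (k : Int) none).toNat ≠ k := by
        intro he
        exact h (he ▸ ha2)
      have hnlt1 : ¬ (PySem.Chars.findFrom t sub (k : Int) none).toNat
          < (PySem.Chars.findFrom t sub ((k + 1 : Nat) : Int) none).toNat := by
        intro hlt'
        exact hb3 _ (by omega) hlt' ha2
      have hnlt2 : ¬ (PySem.Chars.findFrom t sub ((k + 1 : Nat) : Int) none).toNat
          < (PySem.Chars.findFrom t sub (k : Int) none).toNat := by
        intro hlt'
        exact ha3 _ (by omega) hlt' hb2
      omega
  · have hk' : k = t.length := by omega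
    subst hk'
    have hsub : sub ≠ [] := by
      intro he
      exact h (by simp [he])
    rw [pvFF_ge t sub hsub t.length le_rfl, pvFF_ge t sub hsub (t.length + 1) (by omega)]

-- main invariant: with sufficient fuel, the scan in closed state computes A's loop, and
-- in open state it computes A's "search for the end tag from here" continuation
theorem pvKey (t tg : List Char) (n : Nat) :
    ∀ i count, t.length + 1 - i = n →
      (∀ f1 f2, t.length + 1 - i ≤ f1 → t.length + 1 - i ≤ f2 →
        pvScanB t tg f1 i false count = pvLoopA t tg f2 i count) ∧
      (∀ g1 g2, t.length + 1 - i ≤ g1 → t.length - i ≤ g2 →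
        pvScanB t tg g1 i true count =
          (if PySem.Chars.findFrom t (('<' :: '/' :: tg) ++ ['>']) (i : Int) none = -1 then count
           else pvLoopA t tg g2
             ((PySem.Chars.findFrom t (('<' :: '/' :: tg) ++ ['>']) (i : Int) none
               + ((('<' :: '/' :: tg) ++ ['>']).length : Int)).toNat) (count + 1))) := by
  induction n using Nat.strong_induction_on with
  | _ n IH =>
  intro i count hn
  by_cases hlt : i < t.length
  · have hile : i ≤ t.length := le_of_lt hlt
    have hne : ¬ ((i : Int) = -1) := by omega
    constructor
    · -- closed state ↔ A's search for the start tag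
      intro f1 f2 hf1 hf2
      obtain ⟨k1, rfl⟩ : ∃ k, f1 = k + 1 := ⟨f1 - 1, by omega⟩
      obtain ⟨k2, rfl⟩ : ∃ k, f2 = k + 1 := ⟨f2 - 1, by omega⟩
      by_cases hst : ('<' :: (tg ++ ['>'])) <+: t.drop i
      · -- the start tag begins exactly at i
        have hsw : PySem.Chars.startswith (t.drop i) ('<' :: (tg ++ ['>'])) = true :=
          (PySem.Chars.startswith_iff _ _).2 hst
        have hmatch : PySem.Chars.findFrom t ('<' :: (tg ++ ['>'])) (i : Int) none = (i : Int) :=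
          pvFF_match t _ i hile hst
        have hQ := ((IH (t.length + 1 - (i + (tg.length + 1 + 1))) (by omega)
          (i + (tg.length + 1 + 1)) count rfl).2) k1 k2 (by omega) (by omega)
        simp only [pvScanB, pvLoopA, List.cons_append, List.length_append, List.length_cons,
          List.length_nil, Nat.cast_add, Nat.cast_one, zero_add] at hQ ⊢
        simp [hlt, hsw, hmatch, hne]
        exact hQ
      · -- no match at i: both sides step to i + 1
        have hsw : PySem.Chars.startswith (t.drop i) ('<' :: (tg ++ ['>'])) = false := by
          rw [← Bool.not_eq_true]
          intro hc
          exact hst ((PySem.Chars.startswith_iff _ _).1 hc)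
        have hstep := pvFF_step t ('<' :: (tg ++ ['>'])) i hile hst
        have hP := ((IH (t.length + 1 - (i + 1)) (by omega) (i + 1) count rfl).1)
          k1 (k2 + 1) (by omega) (by omega)
        have hloop : pvLoopA t tg (k2 + 1) i count = pvLoopA t tg (k2 + 1) (i + 1) count := by
          simp only [pvLoopA, List.cons_append]
          rw [hstep]
        simp only [pvScanB, List.cons_append]
        simp [hlt, hsw]
        rw [hP, ← hloop]
    · -- open state ↔ A's search for the end tag
      intro g1 g2 hg1 hg2
      obtain ⟨k1, rfl⟩ : ∃ k, g1 = k + 1 := ⟨g1 - 1, by omega⟩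
      by_cases hst : ('<' :: '/' :: (tg ++ ['>'])) <+: t.drop i
      · have hsw : PySem.Chars.startswith (t.drop i) ('<' :: '/' :: (tg ++ ['>'])) = true :=
          (PySem.Chars.startswith_iff _ _).2 hst
        have hmatch : PySem.Chars.findFrom t ('<' :: '/' :: (tg ++ ['>'])) (i : Int) none = (i : Int) :=
          pvFF_match t _ i hile hst
        have hP := ((IH (t.length + 1 - (i + (tg.length + 1 + 1 + 1))) (by omega)
          (i + (tg.length + 1 + 1 + 1)) (count + 1) rfl).1) k1 g2 (by omega) (by omega)
        simp only [pvScanB, List.cons_append, List.length_append, List.length_cons,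
          List.length_nil, Nat.cast_add, Nat.cast_one, zero_add] at hP ⊢
        simp [hlt, hsw, hmatch, hne]
        have hcast : (((i : Int) + ((tg.length : Int) + 1 + 1 + 1)).toNat) = i + (tg.length + 1 + 1 + 1) := by
          omega
        rw [hcast, hP]
      · have hsw : PySem.Chars.startswith (t.drop i) ('<' :: '/' :: (tg ++ ['>'])) = false := by
          rw [← Bool.not_eq_true]
          intro hc
          exact hst ((PySem.Chars.startswith_iff _ _).1 hc)
        have hstep := pvFF_step t ('<' :: '/' :: (tg ++ ['>'])) i hile hst
        have hQ := ((IH (t.length + 1 - (i + 1)) (by omega) (i + 1) count rfl).2)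
          k1 g2 (by omega) (by omega)
        simp only [pvScanB, List.cons_append, List.length_append, List.length_cons,
          List.length_nil, Nat.cast_add, Nat.cast_one, zero_add] at hstep hQ ⊢
        simp [hlt, hsw]
        rw [hQ, ← hstep]
  · -- i ≥ len: both loops stop
    have hge : t.length ≤ i := by omega
    have h1 : PySem.Chars.findFrom t ('<' :: (tg ++ ['>'])) (i : Int) none = -1 :=
      pvFF_ge t _ (by simp) i hge
    have h2 : PySem.Chars.findFrom t ('<' :: '/' :: (tg ++ ['>'])) (i : Int) none = -1 :=
      pvFF_ge t _ (by simp) i hge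
    constructor
    · intro f1 f2 hf1 hf2
      rcases f1 with _ | k1 <;> rcases f2 with _ | k2 <;>
        simp [pvScanB, pvLoopA, hlt, h1]
    · intro g1 g2 hg1 hg2
      rcases g1 with _ | k1 <;>
        simp [pvScanB, hlt, h2]

-- ===== VERDICT (by name: the statement is the Claim_ definition above) =====
theorem count_valid_tags_spec : Claim_equal_count_valid_tags := by
  intro text tag _
  unfold Spec_count_valid_tags count_valid_tags count_valid_tags_alt
  exact (((pvKey text.toList tag.toList (text.toList.length + 1) 0 0 rfl).1)
    (text.toList.length + 1) (text.toList.length + 1) (by omega) (by omega)).symm
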